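-- pv_equiv track=rewrite | github.com/Thomasliminator/launch_scheduler | launch.py | single_ship
-- ===== SOURCE A (Python) =====
-- def single_ship(single_comb):
--     add = True
--     for ship in spaceships:
--         count = 0
--         for j in single_comb:
--             if j[0] == ship and count >= 1:
--                 add = False
--                 break
--             elif j[0] == ship and count == 0:
--                 count += 1
--         if add == False:
--             break
--     return add
--
-- spaceships = ["Bumblebee3", "Bumblebee4", "Orca2", "Moose2", "Bear3"]
-- ===== SOURCE B (Python) =====
-- spaceships = ["Bumblebee3", "Bumblebee4", "Orca2", "Moose2", "Bear3"]
--
-- def single_ship(single_comb):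
--     counts = {}
--     for j in single_comb:
--         h = j[0]
--         counts[h] = counts.get(h, 0) + 1
--     return all(counts.get(ship, 0) < 2 for ship in spaceships)
-- ===== Notes on version B (the rewrite author's own statement) =====
-- stated objective: idiomatic
-- what changed: B builds a frequency table of first elements in one pass and then checks each known ship's count once, replacing A's per-ship rescans of single_comb with dict lookups.
-- outside the precondition, e.g. on single_ship([['Bumblebee3'], ['Bumblebee3'], []]): A returns False, B raises IndexError
import Mathlib
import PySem

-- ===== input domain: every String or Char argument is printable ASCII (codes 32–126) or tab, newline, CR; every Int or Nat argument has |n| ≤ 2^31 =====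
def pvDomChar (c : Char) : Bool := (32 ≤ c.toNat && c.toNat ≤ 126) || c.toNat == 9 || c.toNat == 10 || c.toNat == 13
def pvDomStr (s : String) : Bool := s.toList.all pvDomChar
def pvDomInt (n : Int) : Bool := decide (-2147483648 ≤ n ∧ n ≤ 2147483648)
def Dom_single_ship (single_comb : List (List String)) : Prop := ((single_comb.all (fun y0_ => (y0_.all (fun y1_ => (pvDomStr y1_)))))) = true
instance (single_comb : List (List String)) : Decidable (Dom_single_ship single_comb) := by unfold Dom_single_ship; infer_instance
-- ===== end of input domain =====

-- B replaces A's per-ship rescans of single_comb by one frequency-table pass plus a per-ship lookup (idiomatic).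


-- ===== PORT A =====
def pvSpaceships : List String := ["Bumblebee3", "Bumblebee4", "Orca2", "Moose2", "Bear3"]

-- inner 'for j in single_comb' loop of A, carrying 'count'; j[0] via pyGet? (none = IndexError, excluded by Pre_, default "" unreached there)
def pvInnerA (ship : String) : List (List String) → Int → Bool
  | [], _ => true
  | j :: rest, count =>
    let h := (PySem.List.pyGet? j 0).getD ""
    if h == ship && decide (1 ≤ count) then false          -- add = False; break
    else if h == ship && decide (count = 0) then pvInnerA ship rest (count + 1)
    else pvInnerA ship rest count

-- outer 'for ship in spaceships' loop; 'if add == False: break'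
def pvOuterA : List String → List (List String) → Bool
  | [], _ => true
  | ship :: rest, sc => if pvInnerA ship sc 0 then pvOuterA rest sc else false

def single_ship (single_comb : List (List String)) : Bool :=
  pvOuterA pvSpaceships single_comb

-- ===== PORT B =====
-- counts[h] = counts.get(h, 0) + 1 over one pass; then all known ships checked against the table
def single_ship_alt (single_comb : List (List String)) : Bool :=
  let counts : PySem.Dict String Int :=
    single_comb.foldl
      (fun d j =>
        let h := (PySem.List.pyGet? j 0).getD ""
        d.insert h (d.getD h 0 + 1))
      PySem.Dict.empty
  pvSpaceships.all (fun ship => decide (counts.getD ship 0 < 2))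

-- ===== PRECONDITION & SPEC =====
-- Pre_ excludes inputs containing an empty inner list: j[0] raises IndexError there in both programs on almost
-- all such inputs (A can still return False if it finds a duplicate of the first known ship before reaching the
-- empty element, but B's single pass always reaches it and raises).
def Pre_single_ship (single_comb : List (List String)) : Prop :=
  ∀ j ∈ single_comb, j ≠ []
instance (single_comb : List (List String)) : Decidable (Pre_single_ship single_comb) := by unfold Pre_single_ship; infer_instance
def pvWitness_single_ship : List (List String) := [["Orca2"], ["Bumblebee3", "x"]]

def Spec_single_ship (single_comb : List (List String)) (out : Bool) : Prop := out = single_ship_alt single_comb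
instance (single_comb : List (List String)) (out : Bool) : Decidable (Spec_single_ship single_comb out) := by unfold Spec_single_ship; infer_instance

-- ===== CLAIM (what is proved, stated in full; the proofs are below) =====
def Claim_equal_single_ship : Prop := ∀ (single_comb : List (List String)), Dom_single_ship single_comb → Pre_single_ship single_comb → Spec_single_ship single_comb (single_ship single_comb)

-- ===== LEMMAS AND PROOFS =====

-- heads as B counts them
def pvHd (j : List String) : String := (PySem.List.pyGet? j 0).getD ""

theorem pvInnerA_one (ship : String) (l : List (List String)) :
    pvInnerA ship l 1 = decide ((l.map pvHd).count ship = 0) := by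
  induction l with
  | nil => simp [pvInnerA]
  | cons j rest ih =>
    simp only [pvInnerA, List.map_cons]
    by_cases h : pvHd j = ship
    · simp [pvHd] at h ⊢
      simp [h]
    · simp [pvHd] at h ⊢
      simp [h, ih]

theorem pvInnerA_zero (ship : String) (l : List (List String)) :
    pvInnerA ship l 0 = decide ((l.map pvHd).count ship ≤ 1) := by
  induction l with
  | nil => simp [pvInnerA]
  | cons j rest ih =>
    simp only [pvInnerA, List.map_cons]
    by_cases h : pvHd j = ship
    · simp [pvHd] at h ⊢
      simp [h, pvInnerA_one]
    · simp [pvHd] at h ⊢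
      simp [h, ih]

theorem pvOuterA_all (ships : List String) (sc : List (List String)) :
    pvOuterA ships sc = ships.all (fun s => pvInnerA s sc 0) := by
  induction ships with
  | nil => rfl
  | cons s rest ih =>
    simp only [pvOuterA, List.all_cons]
    by_cases h : pvInnerA s sc 0 <;> simp [h, ih]

theorem pvCounts_getD_gen (sc : List (List String)) : ∀ (d : PySem.Dict String Int) (ship : String),
    (sc.foldl
      (fun d j =>
        let h := (PySem.List.pyGet? j 0).getD ""
        d.insert h (d.getD h 0 + 1)) d).getD ship 0
    = d.getD ship 0 + ((sc.map pvHd).count ship : Int) := by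
  induction sc with
  | nil => intro d ship; simp
  | cons j rest ih =>
    intro d ship
    simp only [List.foldl_cons, List.map_cons, List.count_cons]
    rw [ih, PySem.Dict.getD_insert]
    by_cases h : ship = pvHd j
    · simp [pvHd] at h
      simp [h, pvHd]
      omega
    · simp [pvHd] at h
      simp [h, pvHd, Ne.symm h]

theorem pvCounts_getD (sc : List (List String)) (ship : String) :
    (sc.foldl
      (fun d j =>
        let h := (PySem.List.pyGet? j 0).getD ""
        d.insert h (d.getD h 0 + 1))
      PySem.Dict.empty).getD ship 0 = ((sc.map pvHd).count ship : Int) := by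
  rw [pvCounts_getD_gen]
  simp

-- ===== VERDICT (by name: the statement is the Claim_ definition above) =====
theorem single_ship_spec : Claim_equal_single_ship := by
  intro sc _ _
  unfold Spec_single_ship single_ship
  simp only [single_ship_alt]
  rw [pvOuterA_all]
  apply congrArg
  funext ship
  rw [pvInnerA_zero, pvCounts_getD]
  simp only [decide_eq_decide]
  omega
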